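-- pv_equiv track=rewrite | github.com/Timiport/OSCAR-to-Google-and-MSCalendar | MSCalendarAPI/calendarCreater.py | getWeek
-- ===== SOURCE A (Python) =====
-- def getWeek(weekdays):
--     weeks = []
--     for element in weekdays:
--         if element == "M":
--             weeks.append("Monday")
--         elif element == "T":
--             weeks.append("Tuesday")
--         elif element == "W":
--             weeks.append("Wednesday")
--         elif element == "R":
--             weeks.append("Thursday")
--         else:
--             weeks.append("Friday")
--     return weeks
-- ===== SOURCE B (Python) =====
-- def getWeek(weekdays):
--     # Staged overwrite: start with all Fridays, then one pass per known letter
--     # stamping its day name over the matching positions.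
--     weeks = ["Friday"] * len(weekdays)
--     for letter, day in (("M", "Monday"), ("T", "Tuesday"),
--                         ("W", "Wednesday"), ("R", "Thursday")):
--         for i, element in enumerate(weekdays):
--             if element == letter:
--                 weeks[i] = day
--     return weeks
-- ===== Notes on version B (the rewrite author's own statement) =====
-- stated objective: alternative
-- what changed: Instead of walking each element through a four-way if/elif chain in one pass, B pre-fills the output with the default 'Friday' and then makes one stamping pass per known letter, overwriting the matching positions in place.
import Mathlib
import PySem

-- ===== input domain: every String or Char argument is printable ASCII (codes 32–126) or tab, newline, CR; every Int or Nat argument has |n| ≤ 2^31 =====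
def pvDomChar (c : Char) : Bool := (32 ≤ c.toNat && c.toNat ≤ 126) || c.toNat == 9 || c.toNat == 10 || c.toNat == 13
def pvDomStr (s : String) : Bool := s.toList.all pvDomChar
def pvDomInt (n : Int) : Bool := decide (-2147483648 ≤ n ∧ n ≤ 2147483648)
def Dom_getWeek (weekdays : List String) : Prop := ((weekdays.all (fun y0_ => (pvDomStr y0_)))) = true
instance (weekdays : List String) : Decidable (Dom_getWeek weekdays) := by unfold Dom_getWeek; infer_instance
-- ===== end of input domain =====

-- B replaces A's single-pass if/elif chain by a pre-filled all-'Friday' output and one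
-- stamping pass per known letter overwriting matching positions ('alternative'; same O(n)).

-- ===== PORT A =====
def getWeek (weekdays : List String) : List String :=
  weekdays.foldl (fun weeks element =>
    if element == "M" then weeks ++ ["Monday"]
    else if element == "T" then weeks ++ ["Tuesday"]
    else if element == "W" then weeks ++ ["Wednesday"]
    else if element == "R" then weeks ++ ["Thursday"]
    else weeks ++ ["Friday"]) []

-- ===== PORT B =====
-- one stamping pass: for i, element in enumerate(weekdays): if element == letter: weeks[i] = day
def stampPass (weekdays : List String) (letter day : String) (weeks : List String) : List String :=
  (weekdays.zip weeks).map (fun ew => if ew.1 == letter then day else ew.2)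

def getWeek_alt (weekdays : List String) : List String :=
  [("M", "Monday"), ("T", "Tuesday"), ("W", "Wednesday"), ("R", "Thursday")].foldl
    (fun weeks p => stampPass weekdays p.1 p.2 weeks)
    (weekdays.map (fun _ => "Friday"))

-- ===== PRECONDITION & SPEC =====
def Spec_getWeek (weekdays : List String) (out : List String) : Prop := out = getWeek_alt weekdays
instance (weekdays : List String) (out : List String) : Decidable (Spec_getWeek weekdays out) := by unfold Spec_getWeek; infer_instance

-- ===== CLAIM (what is proved, stated in full; the proofs are below) =====
def Claim_equal_getWeek : Prop := ∀ (weekdays : List String), Dom_getWeek weekdays → Spec_getWeek weekdays (getWeek weekdays)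

-- ===== LEMMAS AND PROOFS =====
lemma getWeek_foldl_acc (weekdays : List String) (acc : List String) :
    weekdays.foldl (fun weeks element =>
      if element == "M" then weeks ++ ["Monday"]
      else if element == "T" then weeks ++ ["Tuesday"]
      else if element == "W" then weeks ++ ["Wednesday"]
      else if element == "R" then weeks ++ ["Thursday"]
      else weeks ++ ["Friday"]) acc
    = acc ++ weekdays.map (fun e =>
        if e == "M" then "Monday"
        else if e == "T" then "Tuesday"
        else if e == "W" then "Wednesday"
        else if e == "R" then "Thursday"
        else "Friday") := by
  induction weekdays generalizing acc with
  | nil => simp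
  | cons e rest ih =>
    simp only [List.foldl_cons, List.map_cons, ih]
    split_ifs <;> simp

lemma getWeek_alt_eq_map (weekdays : List String) :
    getWeek_alt weekdays
    = weekdays.map (fun e =>
        if e == "M" then "Monday"
        else if e == "T" then "Tuesday"
        else if e == "W" then "Wednesday"
        else if e == "R" then "Thursday"
        else "Friday") := by
  unfold getWeek_alt stampPass
  induction weekdays with
  | nil => simp
  | cons e rest ih =>
    simp only [List.foldl_cons, List.map_cons, List.zip_cons_cons, List.foldl_nil] at *
    split_ifs <;> simp_all

-- ===== VERDICT (by name: the statement is the Claim_ definition above) =====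
theorem getWeek_spec : Claim_equal_getWeek := by
  intro weekdays _
  show getWeek weekdays = getWeek_alt weekdays
  unfold getWeek
  rw [getWeek_foldl_acc, getWeek_alt_eq_map]
  simp
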